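-- pv_equiv track=rewrite | github.com/MurakamiHonami/my_first_repository | test/solo_mahjong_1.py | tile_sort
-- ===== SOURCE A (Python) =====
-- def tile_sort(tehai,tiles_type):
--
--     # アフター
--     character_keep = []
--     sort_tehai=[]
--     # マンズ、ピンズ、ソウズの順にソート
--     for tiles_type_cnt in range(TILES_TYPE_CNT):
--         sort_tehai_type=[]
--         for pai in tehai:
--             # 数牌なら
--             if pai[0].isdigit():
--                     if pai[1] == tiles_type[tiles_type_cnt]: sort_tehai_type.append(pai)
--             # 字牌なら
--             # 最後の繰り返し処理で通るようにする(字牌数*3追加してしまうため)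
--             elif tiles_type_cnt == 2:
--                 character_keep.append(pai)
--
--             # 同じ種類間で数字のソート
--             sort_tehai_type.sort()
--         sort_tehai+=sort_tehai_type
--
--     # 字牌を末尾に追加
--     for character in character_keep:
--         sort_tehai.append(character)
--
--     return sort_tehai
--
-- TILES_TYPE_CNT = 3 #マンズ、ピンズ、ソウズの3つの種類
-- ===== SOURCE B (Python) =====
-- def tile_sort(tehai, tiles_type):
--     # Decorate-sort: one stable sort of the whole hand by the key (suit rank, tile),
--     # honors keyed after all suits; suited tiles with an unknown suit are dropped.
--     rank = {s: i for i, s in enumerate(tiles_type[:3])}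
--     kept = [p for p in tehai if not p[0].isdigit() or p[1] in rank]
--     return sorted(kept, key=lambda p: (rank[p[1]], p) if p[0].isdigit() else (3, ''))
-- ===== Notes on version B (the rewrite author's own statement) =====
-- stated objective: alternative
-- what changed: A makes three passes over the hand, one per suit, re-sorting the growing bucket after every tile and collecting honors on the third pass; B builds a suit-rank dict once and does a single stable sort of the whole hand under the key (rank[suit], tile) with honors keyed last.
-- intended difference: On hands containing a suited tile whose suit occurs more than once among the first three suit names, A returns that tile once per occurrence (its per-suit bucket loop re-collects it), while B returns each tile of the hand exactly once, the intended sorted hand. — e.g. on tile_sort(["1m"], ["m", "m", "s"]): A returns ["1m", "1m"], B returns ["1m"]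
import Mathlib
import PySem

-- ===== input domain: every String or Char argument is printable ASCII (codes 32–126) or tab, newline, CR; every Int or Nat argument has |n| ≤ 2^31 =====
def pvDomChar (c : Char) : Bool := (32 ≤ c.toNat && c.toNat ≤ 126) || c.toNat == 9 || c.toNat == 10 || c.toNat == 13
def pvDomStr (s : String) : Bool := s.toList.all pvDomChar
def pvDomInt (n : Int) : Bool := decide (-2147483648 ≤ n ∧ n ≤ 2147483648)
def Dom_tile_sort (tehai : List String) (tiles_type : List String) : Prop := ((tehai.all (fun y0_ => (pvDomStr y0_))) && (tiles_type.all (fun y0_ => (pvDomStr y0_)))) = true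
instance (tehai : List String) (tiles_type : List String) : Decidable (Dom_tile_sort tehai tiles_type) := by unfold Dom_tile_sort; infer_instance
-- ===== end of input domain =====

-- B replaces A's three bucket passes (with a re-sort after every append) by one decorate-style stable sort
-- of the whole hand under the key (suit rank, tile); on hands where a suited tile's suit is duplicated in the
-- first three suit names, A emits that tile once per duplicate (D_ below) while B emits each tile once.


-- ===== PORT A =====
-- pai[0].isdigit()  (pai[0] raises on the empty string — excluded by Pre_; the port returns false there)
def pvIsNum (pai : String) : Bool :=
  match PySem.Str.pyGet? pai 0 with
  | some c => PySem.Chars.isdigit c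
  | none => false

-- pai[1] as a 1-character string (raises when len(pai) < 2 — excluded by Pre_; the port returns "" there)
def pvSuitStr (pai : String) : String :=
  match PySem.Str.pyGet? pai 1 with
  | some c => String.ofList [c]
  | none => ""

-- body of A's inner 'for pai in tehai' loop, at suit s = tiles_type[tiles_type_cnt]
def pvInnerA (s : String) (tcnt : Int) (st2 : List String × List String) (pai : String) :
    List String × List String :=
  let st3 :=
    if pvIsNum pai then
      (if pvSuitStr pai == s then (st2.1 ++ [pai], st2.2) else st2)
    else if tcnt = 2 then (st2.1, st2.2 ++ [pai]) else st2
  (PySem.List.sorted st3.1 (fun x => x) false, st3.2)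

def tile_sort (tehai : List String) (tiles_type : List String) : List String :=
  let st := (PySem.List.pyRange 0 3 1).foldl
    (fun (acc : List String × List String) tcnt =>
      let inner := tehai.foldl (pvInnerA (PySem.List.pyGetD tiles_type tcnt "") tcnt) ([], acc.2)
      (acc.1 ++ inner.1, inner.2))
    ([], [])
  st.1 ++ st.2

-- ===== PORT B =====
-- rank = {s: i for i, s in enumerate(tiles_type[:3])}
def pvRank (tiles_type : List String) : PySem.Dict String Int :=
  (PySem.List.enumerate (PySem.List.slice tiles_type none (some 3))).foldl
    (fun d iv => d.insert iv.2 iv.1) PySem.Dict.empty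

-- the list-comprehension filter: not p[0].isdigit() or p[1] in rank
def pvKeptP (rank : PySem.Dict String Int) (p : String) : Bool :=
  !pvIsNum p || rank.contains (pvSuitStr p)

-- the sort key (rank[p[1]], p) if p[0].isdigit() else (3, ''), as the two components of a tuple key.
-- rank[p[1]] is total here because the filter kept only tiles whose suit is in rank (getD's default is never read).
def pvK1 (rank : PySem.Dict String Int) (p : String) : Int :=
  if pvIsNum p then rank.getD (pvSuitStr p) 0 else 3
def pvK2 (p : String) : String :=
  if pvIsNum p then p else ""

def tile_sort_alt (tehai : List String) (tiles_type : List String) : List String :=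
  let rank := pvRank tiles_type
  PySem.List.sorted2 (tehai.filter (pvKeptP rank)) (pvK1 rank) pvK2

-- ===== PRECONDITION & SPEC =====
-- Pre_ is exactly where the Python A returns: every tile is nonempty and a digit-led tile has a second
-- character (else pai[0]/pai[1] raise IndexError), and if any digit-led tile exists tiles_type must have
-- at least 3 entries (else tiles_type[tiles_type_cnt] raises IndexError).
def Pre_tile_sort (tehai : List String) (tiles_type : List String) : Prop :=
  (∀ pai ∈ tehai, pai.toList ≠ [] ∧ (PySem.Chars.isdigit pai.toList.headI = true → 2 ≤ pai.toList.length)) ∧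
  (3 ≤ tiles_type.length ∨ ∀ pai ∈ tehai, PySem.Chars.isdigit pai.toList.headI = false)
instance (tehai : List String) (tiles_type : List String) : Decidable (Pre_tile_sort tehai tiles_type) := by
  unfold Pre_tile_sort; infer_instance

def pvWitness_tile_sort : List String × List String :=
  (["1m", "E", "3p", "2m", "9s"], ["m", "p", "s"])

-- On hands containing a suited tile whose suit occurs more than once among the first three suit names,
-- A's per-suit bucket loop collects that tile once per occurrence (the hand grows), while B returns each
-- tile of the hand exactly once, which is the intended sorted hand.
def D_tile_sort (tehai : List String) (tiles_type : List String) : Prop :=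
  ∃ p ∈ tehai, PySem.Chars.isdigit p.toList.headI = true ∧
    2 ≤ (tiles_type.take 3).count (String.ofList [p.toList.tail.headI])
instance (tehai : List String) (tiles_type : List String) : Decidable (D_tile_sort tehai tiles_type) := by
  unfold D_tile_sort; infer_instance

def Spec_tile_sort (tehai : List String) (tiles_type : List String) (out : List String) : Prop := ¬ D_tile_sort tehai tiles_type → out = tile_sort_alt tehai tiles_type
instance (tehai : List String) (tiles_type : List String) (out : List String) : Decidable (Spec_tile_sort tehai tiles_type out) := by unfold Spec_tile_sort; infer_instance

def pvDiffWitness_tile_sort : List String × List String := (["1m"], ["m", "m", "s"])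
def pvDiffWitnessOut_tile_sort : (List String) × (List String) := (["1m", "1m"], ["1m"])

-- ===== CLAIM (what is proved, stated in full; the proofs are below) =====
def Claim_unchanged_tile_sort : Prop := ∀ (tehai : List String) (tiles_type : List String), Dom_tile_sort tehai tiles_type → Pre_tile_sort tehai tiles_type → Spec_tile_sort tehai tiles_type (tile_sort tehai tiles_type)
def Claim_exact_tile_sort : Prop := ∀ (tehai : List String) (tiles_type : List String), Dom_tile_sort tehai tiles_type → Pre_tile_sort tehai tiles_type → D_tile_sort tehai tiles_type → tile_sort tehai tiles_type ≠ tile_sort_alt tehai tiles_type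
def Claim_changed_tile_sort : Prop := Dom_tile_sort (pvDiffWitness_tile_sort.1) (pvDiffWitness_tile_sort.2) ∧ Pre_tile_sort (pvDiffWitness_tile_sort.1) (pvDiffWitness_tile_sort.2) ∧ D_tile_sort (pvDiffWitness_tile_sort.1) (pvDiffWitness_tile_sort.2) ∧ tile_sort (pvDiffWitness_tile_sort.1) (pvDiffWitness_tile_sort.2) = pvDiffWitnessOut_tile_sort.1 ∧ tile_sort_alt (pvDiffWitness_tile_sort.1) (pvDiffWitness_tile_sort.2) = pvDiffWitnessOut_tile_sort.2 ∧ pvDiffWitnessOut_tile_sort.1 ≠ pvDiffWitnessOut_tile_sort.2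

-- ===== LEMMAS AND PROOFS =====

-- the lexicographic 'before' test of sorted2 with tuple key (k1, k2)
def pvLt (k1 : String → Int) (k2 : String → String) (a b : String) : Bool :=
  decide (k1 a < k1 b) || (!decide (k1 b < k1 a) && decide (k2 a < k2 b))

theorem pv_sorted2_eq_foldl (xs : List String) (k1 : String → Int) (k2 : String → String) :
    PySem.List.sorted2 xs k1 k2 false
      = xs.foldl (fun acc x => PySem.List.insertBy (pvLt k1 k2) x acc) [] := rfl

-- sorting after stably pre-sorting a prefix changes nothing (strings: identity key, linear order)
theorem pv_sorted_sorted_append (L M : List String) :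
    PySem.List.sorted (PySem.List.sorted L (fun x => x) false ++ M) (fun x => x) false
      = PySem.List.sorted (L ++ M) (fun x => x) false :=
  PySem.List.sorted_eq_sorted_of_perm _ _ _ (fun _ _ h => h)
    ((PySem.List.sorted_perm L (fun x => x) false).append_right M)

-- invariant of A's inner loop: it ends with the sorted suit bucket and the accumulated honors
theorem pv_innerA_eq (tehai : List String) (s : String) (tcnt : Int) (L kp : List String) :
    tehai.foldl (pvInnerA s tcnt) (PySem.List.sorted L (fun x => x) false, kp)
      = (PySem.List.sorted (L ++ tehai.filter (fun pai => pvIsNum pai && (pvSuitStr pai == s))) (fun x => x) false,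
         kp ++ (if tcnt = 2 then tehai.filter (fun pai => !pvIsNum pai) else [])) := by
  induction tehai generalizing L kp with
  | nil => simp
  | cons pai t ih =>
    simp only [List.foldl_cons]
    by_cases hnum : pvIsNum pai
    · by_cases hmatch : pvSuitStr pai == s
      · have : pvInnerA s tcnt (PySem.List.sorted L (fun x => x) false, kp) pai
            = (PySem.List.sorted (L ++ [pai]) (fun x => x) false, kp) := by
          simp [pvInnerA, hnum, hmatch, pv_sorted_sorted_append]
        rw [this, ih (L ++ [pai]) kp]
        simp [hnum, hmatch]
      · have : pvInnerA s tcnt (PySem.List.sorted L (fun x => x) false, kp) pai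
            = (PySem.List.sorted L (fun x => x) false, kp) := by
          simp [pvInnerA, hnum, hmatch, PySem.List.sorted_sorted]
        rw [this, ih L kp]
        simp [hnum, hmatch]
    · by_cases htc : tcnt = 2
      · have : pvInnerA s tcnt (PySem.List.sorted L (fun x => x) false, kp) pai
            = (PySem.List.sorted L (fun x => x) false, kp ++ [pai]) := by
          simp [pvInnerA, hnum, htc, PySem.List.sorted_sorted]
        rw [this, ih L (kp ++ [pai])]
        simp [hnum, htc]
      · have : pvInnerA s tcnt (PySem.List.sorted L (fun x => x) false, kp) pai
            = (PySem.List.sorted L (fun x => x) false, kp) := by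
          simp [pvInnerA, hnum, htc, PySem.List.sorted_sorted]
        rw [this, ih L kp]
        simp [hnum, htc]

-- the inner loop started from ([], kp), as A starts it
theorem pv_innerA_eq' (tehai : List String) (s : String) (tcnt : Int) (kp : List String) :
    tehai.foldl (pvInnerA s tcnt) ([], kp)
      = (PySem.List.sorted (tehai.filter (fun pai => pvIsNum pai && (pvSuitStr pai == s))) (fun x => x) false,
         kp ++ (if tcnt = 2 then tehai.filter (fun pai => !pvIsNum pai) else [])) := by
  have h0 : ([] : List String) = PySem.List.sorted [] (fun x => x) false := by
    simp [PySem.List.sorted_eq_nil_iff]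
  rw [show (([], kp) : List String × List String) = (PySem.List.sorted [] (fun x => x) false, kp) by rw [← h0]]
  simpa using pv_innerA_eq tehai s tcnt [] kp

-- inserting past a suffix every element of which comes strictly after x
theorem pv_insertBy_left (before : String → String → Bool) (x : String) (A B : List String)
    (h : ∀ b ∈ B, before x b = true) :
    PySem.List.insertBy before x (A ++ B) = PySem.List.insertBy before x A ++ B := by
  induction A with
  | nil =>
    cases B with
    | nil => simp [PySem.List.insertBy]
    | cons b bs => simp [PySem.List.insertBy, h b (by simp)]
  | cons a A' ih =>
    by_cases hb : before x a
    · simp [PySem.List.insertBy, hb]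
    · simp [PySem.List.insertBy, hb, ih]

-- inserting past a prefix no element of which comes after x
theorem pv_insertBy_right (before : String → String → Bool) (x : String) (A B : List String)
    (h : ∀ a ∈ A, before x a = false) :
    PySem.List.insertBy before x (A ++ B) = A ++ PySem.List.insertBy before x B := by
  induction A with
  | nil => simp
  | cons a A' ih =>
    have := h a (by simp)
    simp only [List.cons_append, PySem.List.insertBy, this]
    simp only [Bool.false_eq_true, if_false]
    rw [ih (fun a ha => h a (by simp [ha]))]

-- one insertion sort by the lexicographic key splits at any threshold c of the first key
theorem pv_foldl_split (k1 : String → Int) (k2 : String → String) (c : Int) (xs : List String) :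
    ∀ (accA accB : List String), (∀ a ∈ accA, k1 a ≤ c) → (∀ b ∈ accB, c < k1 b) →
    xs.foldl (fun acc x => PySem.List.insertBy (pvLt k1 k2) x acc) (accA ++ accB)
      = (xs.filter (fun x => decide (k1 x ≤ c))).foldl (fun acc x => PySem.List.insertBy (pvLt k1 k2) x acc) accA
        ++ (xs.filter (fun x => !decide (k1 x ≤ c))).foldl (fun acc x => PySem.List.insertBy (pvLt k1 k2) x acc) accB := by
  induction xs with
  | nil => intro accA accB _ _; simp
  | cons x t ih =>
    intro accA accB hA hB
    by_cases hx : k1 x ≤ c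
    · have hstep : PySem.List.insertBy (pvLt k1 k2) x (accA ++ accB)
          = PySem.List.insertBy (pvLt k1 k2) x accA ++ accB := by
        refine pv_insertBy_left _ _ _ _ (fun b hb => ?_)
        have : k1 x < k1 b := lt_of_le_of_lt hx (hB b hb)
        simp [pvLt, this]
      have hA' : ∀ a ∈ PySem.List.insertBy (pvLt k1 k2) x accA, k1 a ≤ c := by
        intro a ha
        rcases (PySem.List.mem_insertBy _ _ _ _).1 ha with rfl | ha
        · exact hx
        · exact hA a ha
      simp only [List.foldl_cons, hstep, List.filter_cons, hx, decide_true, Bool.not_true,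
        if_true, Bool.false_eq_true, if_false]
      exact ih _ _ hA' hB
    · have hstep : PySem.List.insertBy (pvLt k1 k2) x (accA ++ accB)
          = accA ++ PySem.List.insertBy (pvLt k1 k2) x accB := by
        refine pv_insertBy_right _ _ _ _ (fun a ha => ?_)
        have h1 : ¬ k1 x < k1 a := by have := hA a ha; omega
        have h2 : k1 a < k1 x := by have := hA a ha; omega
        simp [pvLt, h1, h2]
      have hB' : ∀ b ∈ PySem.List.insertBy (pvLt k1 k2) x accB, c < k1 b := by
        intro b hb
        rcases (PySem.List.mem_insertBy _ _ _ _).1 hb with rfl | hb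
        · omega
        · exact hB b hb
      simp only [List.foldl_cons, hstep, List.filter_cons, hx, decide_false, Bool.not_false,
        if_true, Bool.false_eq_true, if_false]
      exact ih _ _ hA hB'

theorem pv_sorted2_split (k1 : String → Int) (k2 : String → String) (c : Int) (xs : List String) :
    PySem.List.sorted2 xs k1 k2 false
      = PySem.List.sorted2 (xs.filter (fun x => decide (k1 x ≤ c))) k1 k2 false
        ++ PySem.List.sorted2 (xs.filter (fun x => !decide (k1 x ≤ c))) k1 k2 false := by
  have := pv_foldl_split k1 k2 c xs [] [] (by simp) (by simp)
  simpa [pv_sorted2_eq_foldl] using this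

-- congruence for insertion sort: only comparisons between members matter
theorem pv_insertBy_congr (b1 b2 : String → String → Bool) (x : String) (ys : List String)
    (h : ∀ y ∈ ys, b1 x y = b2 x y) :
    PySem.List.insertBy b1 x ys = PySem.List.insertBy b2 x ys := by
  induction ys with
  | nil => rfl
  | cons y t ih =>
    have hy := h y (by simp)
    by_cases hb : b1 x y
    · simp [PySem.List.insertBy, hb, hy ▸ hb]
    · have : b2 x y = false := by rw [← hy]; simpa using hb
      simp [PySem.List.insertBy, hb, this, ih (fun z hz => h z (by simp [hz]))]

theorem pv_foldl_insertBy_congr (b1 b2 : String → String → Bool) (xs : List String) :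
    ∀ (acc : List String), (∀ a b : String, (a ∈ xs ∨ a ∈ acc) → (b ∈ xs ∨ b ∈ acc) → b1 a b = b2 a b) →
    xs.foldl (fun acc x => PySem.List.insertBy b1 x acc) acc
      = xs.foldl (fun acc x => PySem.List.insertBy b2 x acc) acc := by
  induction xs with
  | nil => intro acc _; rfl
  | cons x t ih =>
    intro acc h
    have hstep : PySem.List.insertBy b1 x acc = PySem.List.insertBy b2 x acc :=
      pv_insertBy_congr _ _ _ _ (fun y hy => h x y (Or.inl (by simp)) (Or.inr hy))
    simp only [List.foldl_cons, hstep]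
    refine ih _ (fun a b ha hb => ?_)
    have hmem : ∀ z : String, z ∈ t ∨ z ∈ PySem.List.insertBy b2 x acc → z ∈ x :: t ∨ z ∈ acc := by
      intro z hz
      rcases hz with hz | hz
      · exact Or.inl (by simp [hz])
      · rcases (PySem.List.mem_insertBy _ _ _ _).1 hz with rfl | hz
        · exact Or.inl (by simp)
        · exact Or.inr hz
    exact h a b (hmem a ha) (hmem b hb)

-- insertion sort under an always-false comparison appends in order (stability on all-tied keys)
theorem pv_foldl_insertBy_false (xs : List String) :
    ∀ (acc : List String),
    xs.foldl (fun acc x => PySem.List.insertBy (fun _ _ => false) x acc) acc = acc ++ xs := by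
  induction xs with
  | nil => intro acc; simp
  | cons x t ih =>
    intro acc
    simp only [List.foldl_cons, PySem.List.insertBy_of_forall_not_before (fun _ _ => false) x acc (by simp), ih]
    simp

-- sorted2 of an all-honors list is the identity (all keys tie at (3, ''))
theorem pv_sorted2_honors (xs : List String) (k1 : String → Int) (k2 : String → String)
    (h : ∀ p ∈ xs, k1 p = 3 ∧ k2 p = "") :
    PySem.List.sorted2 xs k1 k2 false = xs := by
  rw [pv_sorted2_eq_foldl,
    pv_foldl_insertBy_congr (pvLt k1 k2) (fun _ _ => false) xs []
      (by
        intro a b ha hb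
        rcases ha with ha | ha; swap; · simp at ha
        rcases hb with hb | hb; swap; · simp at hb
        obtain ⟨ha1, ha2⟩ := h a ha
        obtain ⟨hb1, hb2⟩ := h b hb
        simp [pvLt, ha1, ha2, hb1, hb2]),
    pv_foldl_insertBy_false]
  simp

-- sorted2 of a one-suit bucket (k1 constant, k2 the identity) is plain sorted
theorem pv_sorted2_bucket (xs : List String) (k1 : String → Int) (k2 : String → String) (i : Int)
    (h : ∀ p ∈ xs, k1 p = i ∧ k2 p = p) :
    PySem.List.sorted2 xs k1 k2 false = PySem.List.sorted xs (fun x => x) false := by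
  rw [pv_sorted2_eq_foldl,
    pv_foldl_insertBy_congr (pvLt k1 k2) (fun a b => decide (a < b)) xs []
      (by
        intro a b ha hb
        rcases ha with ha | ha; swap; · simp at ha
        rcases hb with hb | hb; swap; · simp at hb
        obtain ⟨ha1, ha2⟩ := h a ha
        obtain ⟨hb1, hb2⟩ := h b hb
        simp [pvLt, ha1, ha2, hb1, hb2]),
    PySem.List.sorted_eq_foldl_insertBy]


def pvRank3 (t0 t1 t2 : String) : PySem.Dict String Int :=
  ((PySem.Dict.empty.insert t0 0).insert t1 1).insert t2 2

theorem pv_rank_eq (t0 t1 t2 : String) (r : List String) :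
    pvRank (t0 :: t1 :: t2 :: r) = pvRank3 t0 t1 t2 := by
  have h1 : PySem.List.slice (t0 :: t1 :: t2 :: r) none (some 3) = [t0, t1, t2] := by
    have h : PySem.List.slice (t0 :: t1 :: t2 :: r) none (some 3) = (t0 :: t1 :: t2 :: r).take 3 := by
      simp [pysem]
    simpa using h
  simp only [pvRank, h1, PySem.List.enumerate_cons, PySem.List.enumerate_nil, List.foldl_cons,
    List.foldl_nil, pvRank3]
  norm_num

theorem pv_classify (t0 t1 t2 p : String)
    (hne : p.toList ≠ [])
    (hcnt : PySem.Chars.isdigit p.toList.headI = true →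
      2 ≤ p.toList.length ∧ ([t0, t1, t2]).count (String.ofList [p.toList.tail.headI]) ≤ 1) :
    (pvIsNum p = false ∧ pvKeptP (pvRank3 t0 t1 t2) p = true ∧ pvK1 (pvRank3 t0 t1 t2) p = 3 ∧ pvK2 p = "") ∨
    (pvIsNum p = true ∧ pvK2 p = p ∧
      ((pvKeptP (pvRank3 t0 t1 t2) p = false ∧ pvSuitStr p ≠ t0 ∧ pvSuitStr p ≠ t1 ∧ pvSuitStr p ≠ t2) ∨
       (pvKeptP (pvRank3 t0 t1 t2) p = true ∧ pvK1 (pvRank3 t0 t1 t2) p = 0 ∧ pvSuitStr p = t0 ∧ pvSuitStr p ≠ t1 ∧ pvSuitStr p ≠ t2) ∨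
       (pvKeptP (pvRank3 t0 t1 t2) p = true ∧ pvK1 (pvRank3 t0 t1 t2) p = 1 ∧ pvSuitStr p = t1 ∧ pvSuitStr p ≠ t0 ∧ pvSuitStr p ≠ t2) ∨
       (pvKeptP (pvRank3 t0 t1 t2) p = true ∧ pvK1 (pvRank3 t0 t1 t2) p = 2 ∧ pvSuitStr p = t2 ∧ pvSuitStr p ≠ t0 ∧ pvSuitStr p ≠ t1))) := by
  rcases hl : p.toList with _ | ⟨c0, cs⟩
  · exact absurd hl hne
  have hnum : pvIsNum p = PySem.Chars.isdigit c0 := by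
    simp [pvIsNum, hl]
  by_cases hd : PySem.Chars.isdigit c0
  · -- digit-led tile
    obtain ⟨hlen2, hcount⟩ := hcnt (by simp [hl, hd])
    rcases hcs : cs with _ | ⟨c1, cs'⟩
    · rw [hcs] at hl; rw [hl] at hlen2; simp at hlen2
    have hsuit : pvSuitStr p = String.ofList [c1] := by
      simp [pvSuitStr, hl, hcs]
    have hcount' : ([t0, t1, t2]).count (pvSuitStr p) ≤ 1 := by
      rw [hsuit]; simpa [hl, hcs] using hcount
    have hkept : pvKeptP (pvRank3 t0 t1 t2) p
        = (pvSuitStr p == t2 || (pvSuitStr p == t1 || pvSuitStr p == t0)) := by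
      simp [pvKeptP, pvRank3, hnum, hd, PySem.Dict.contains_insert, PySem.Dict.contains_empty]
    have hgetD : (pvRank3 t0 t1 t2).getD (pvSuitStr p) 0
        = if pvSuitStr p = t2 then 2 else if pvSuitStr p = t1 then 1 else if pvSuitStr p = t0 then 0 else 0 := by
      simp [pvRank3, PySem.Dict.getD_insert, PySem.Dict.getD_empty]
    have hk1 : pvK1 (pvRank3 t0 t1 t2) p = (pvRank3 t0 t1 t2).getD (pvSuitStr p) 0 := by
      simp [pvK1, hnum, hd]
    have hcnt' : (if t0 = pvSuitStr p then 1 else 0)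
        + ((if t1 = pvSuitStr p then 1 else 0) + if t2 = pvSuitStr p then 1 else 0) ≤ 1 := by
      have := hcount'
      simp [List.count_cons] at this
      split_ifs at this <;> split_ifs <;> omega
    have hk2 : pvK2 p = p := by simp [pvK2, hnum, hd]
    refine Or.inr ⟨by simp [hnum, hd], hk2, ?_⟩
    by_cases e2 : pvSuitStr p = t2
    · have h0 : pvSuitStr p ≠ t0 := by
        intro h; rw [if_pos h.symm, if_pos e2.symm] at hcnt'; split_ifs at hcnt' <;> omega
      have h1 : pvSuitStr p ≠ t1 := by
        intro h; rw [if_pos h.symm, if_pos e2.symm] at hcnt'; split_ifs at hcnt' <;> omega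
      refine Or.inr (Or.inr (Or.inr ⟨by simp [hkept, e2], ?_, e2, h0, h1⟩))
      rw [hk1, hgetD, if_pos e2]
    · by_cases e1 : pvSuitStr p = t1
      · have h0 : pvSuitStr p ≠ t0 := by
          intro h; rw [if_pos h.symm, if_pos e1.symm] at hcnt'; split_ifs at hcnt' <;> omega
        refine Or.inr (Or.inr (Or.inl ⟨by simp [hkept, e1], ?_, e1, h0, e2⟩))
        rw [hk1, hgetD, if_neg e2, if_pos e1]
      · by_cases e0 : pvSuitStr p = t0
        · refine Or.inr (Or.inl ⟨by simp [hkept, e0], ?_, e0, e1, e2⟩)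
          rw [hk1, hgetD, if_neg e2, if_neg e1, if_pos e0]
        · refine Or.inl ⟨by simp [hkept, e0, e1, e2], e0, e1, e2⟩
  · -- honor tile
    refine Or.inl ⟨by simp [hnum, hd], by simp [pvKeptP, hnum, hd], by simp [pvK1, hnum, hd], by simp [pvK2, hnum, hd]⟩


-- A's value for a ≥3-entry suit list: three sorted suit buckets then the honors
theorem pv_A_eq (tehai : List String) (t0 t1 t2 : String) (rest : List String) :
    tile_sort tehai (t0 :: t1 :: t2 :: rest)
      = PySem.List.sorted (tehai.filter (fun pai => pvIsNum pai && (pvSuitStr pai == t0))) (fun x => x) false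
        ++ (PySem.List.sorted (tehai.filter (fun pai => pvIsNum pai && (pvSuitStr pai == t1))) (fun x => x) false
        ++ (PySem.List.sorted (tehai.filter (fun pai => pvIsNum pai && (pvSuitStr pai == t2))) (fun x => x) false
        ++ tehai.filter (fun pai => !pvIsNum pai))) := by
  have hrange : PySem.List.pyRange 0 3 1 = [0, 1, 2] := by decide
  have hg1 : PySem.List.pyGet? (t0 :: t1 :: t2 :: rest) 1 = some t1 := by
    simp [PySem.List.pyGet?, PySem.List.pyIdx?]
    rw [if_pos (by omega)]; simp
  have hg2 : PySem.List.pyGet? (t0 :: t1 :: t2 :: rest) 2 = some t2 := by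
    simp [PySem.List.pyGet?, PySem.List.pyIdx?]
    rw [if_pos (by omega)]; simp
  simp only [tile_sort, hrange, List.foldl_cons, List.foldl_nil]
  rw [pv_innerA_eq', pv_innerA_eq', pv_innerA_eq']
  simp [PySem.List.pyGetD, hg1, hg2]

theorem tile_sort_main (tehai : List String) (tiles_type : List String)
    (hpre : Pre_tile_sort tehai tiles_type) (hnd : ¬ D_tile_sort tehai tiles_type) :
    tile_sort tehai tiles_type = tile_sort_alt tehai tiles_type := by
  obtain ⟨hgood, hcase⟩ := hpre
  rcases hcase with hlen | hnodigit
  · -- tiles_type has ≥ 3 entries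
    obtain ⟨t0, t1, t2, rest, rfl⟩ : ∃ t0 t1 t2 rest, tiles_type = t0 :: t1 :: t2 :: rest := by
      match tiles_type, hlen with
      | t0 :: t1 :: t2 :: rest, _ => exact ⟨t0, t1, t2, rest, rfl⟩
    have hcnt : ∀ p ∈ tehai, PySem.Chars.isdigit p.toList.headI = true →
        2 ≤ p.toList.length ∧ ([t0, t1, t2]).count (String.ofList [p.toList.tail.headI]) ≤ 1 := by
      intro p hp hd
      refine ⟨(hgood p hp).2 hd, ?_⟩
      by_contra hcon
      refine hnd ⟨p, hp, hd, ?_⟩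
      simp only [List.take_succ_cons, List.take_zero]
      omega
    have hclass := fun p hp => pv_classify t0 t1 t2 p (hgood p hp).1 (hcnt p hp)
    -- A side
    have hA : tile_sort tehai (t0 :: t1 :: t2 :: rest)
        = PySem.List.sorted (tehai.filter (fun pai => pvIsNum pai && (pvSuitStr pai == t0))) (fun x => x) false
          ++ (PySem.List.sorted (tehai.filter (fun pai => pvIsNum pai && (pvSuitStr pai == t1))) (fun x => x) false
          ++ (PySem.List.sorted (tehai.filter (fun pai => pvIsNum pai && (pvSuitStr pai == t2))) (fun x => x) false
          ++ tehai.filter (fun pai => !pvIsNum pai))) := pv_A_eq tehai t0 t1 t2 rest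
    -- B side
    have hB : tile_sort_alt tehai (t0 :: t1 :: t2 :: rest)
        = PySem.List.sorted2 (tehai.filter (pvKeptP (pvRank3 t0 t1 t2))) (pvK1 (pvRank3 t0 t1 t2)) pvK2 false := by
      simp only [tile_sort_alt, pv_rank_eq]
    have hs0 := pv_sorted2_split (pvK1 (pvRank3 t0 t1 t2)) pvK2 0 (tehai.filter (pvKeptP (pvRank3 t0 t1 t2)))
    have hs1 := pv_sorted2_split (pvK1 (pvRank3 t0 t1 t2)) pvK2 1
      ((tehai.filter (pvKeptP (pvRank3 t0 t1 t2))).filter (fun x => !decide (pvK1 (pvRank3 t0 t1 t2) x ≤ 0)))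
    have hs2 := pv_sorted2_split (pvK1 (pvRank3 t0 t1 t2)) pvK2 2
      (((tehai.filter (pvKeptP (pvRank3 t0 t1 t2))).filter (fun x => !decide (pvK1 (pvRank3 t0 t1 t2) x ≤ 0))).filter
        (fun x => !decide (pvK1 (pvRank3 t0 t1 t2) x ≤ 1)))
    -- the four collapsed filters
    have hC0 : (tehai.filter (pvKeptP (pvRank3 t0 t1 t2))).filter (fun x => decide (pvK1 (pvRank3 t0 t1 t2) x ≤ 0))
        = tehai.filter (fun pai => pvIsNum pai && (pvSuitStr pai == t0)) := by
      rw [List.filter_filter]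
      refine List.filter_congr (fun p hp => ?_)
      rcases hclass p hp with ⟨h1, h2, h3, _⟩ | ⟨h1, _, ⟨hk, e0, e1, e2⟩ | ⟨hk, hv, e0, e1, e2⟩ | ⟨hk, hv, e1, e0, e2⟩ | ⟨hk, hv, e2, e0, e1⟩⟩
      · simp [h1, h2, h3]
      · simp [h1, hk, e0]
      · simp [h1, hk, hv, e0]
      · simp [h1, hk, hv, e0]
      · simp [h1, hk, hv, e0]
    have hC1 : ((tehai.filter (pvKeptP (pvRank3 t0 t1 t2))).filter (fun x => !decide (pvK1 (pvRank3 t0 t1 t2) x ≤ 0))).filter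
          (fun x => decide (pvK1 (pvRank3 t0 t1 t2) x ≤ 1))
        = tehai.filter (fun pai => pvIsNum pai && (pvSuitStr pai == t1)) := by
      rw [List.filter_filter, List.filter_filter]
      refine List.filter_congr (fun p hp => ?_)
      rcases hclass p hp with ⟨h1, h2, h3, _⟩ | ⟨h1, _, ⟨hk, e0, e1, e2⟩ | ⟨hk, hv, e0, e1, e2⟩ | ⟨hk, hv, e1, e0, e2⟩ | ⟨hk, hv, e2, e0, e1⟩⟩
      · simp [h1, h2, h3]
      · simp [h1, hk, e1]
      · simp [h1, hk, hv, e1]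
      · simp [h1, hk, hv, e1]
      · simp [h1, hk, hv, e1]
    have hC2 : (((tehai.filter (pvKeptP (pvRank3 t0 t1 t2))).filter (fun x => !decide (pvK1 (pvRank3 t0 t1 t2) x ≤ 0))).filter
          (fun x => !decide (pvK1 (pvRank3 t0 t1 t2) x ≤ 1))).filter (fun x => decide (pvK1 (pvRank3 t0 t1 t2) x ≤ 2))
        = tehai.filter (fun pai => pvIsNum pai && (pvSuitStr pai == t2)) := by
      rw [List.filter_filter, List.filter_filter, List.filter_filter]
      refine List.filter_congr (fun p hp => ?_)
      rcases hclass p hp with ⟨h1, h2, h3, _⟩ | ⟨h1, _, ⟨hk, e0, e1, e2⟩ | ⟨hk, hv, e0, e1, e2⟩ | ⟨hk, hv, e1, e0, e2⟩ | ⟨hk, hv, e2, e0, e1⟩⟩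
      · simp [h1, h2, h3]
      · simp [h1, hk, e2]
      · simp [h1, hk, hv, e2]
      · simp [h1, hk, hv, e2]
      · simp [h1, hk, hv, e2]
    have hC3 : (((tehai.filter (pvKeptP (pvRank3 t0 t1 t2))).filter (fun x => !decide (pvK1 (pvRank3 t0 t1 t2) x ≤ 0))).filter
          (fun x => !decide (pvK1 (pvRank3 t0 t1 t2) x ≤ 1))).filter (fun x => !decide (pvK1 (pvRank3 t0 t1 t2) x ≤ 2))
        = tehai.filter (fun pai => !pvIsNum pai) := by
      rw [List.filter_filter, List.filter_filter, List.filter_filter]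
      refine List.filter_congr (fun p hp => ?_)
      rcases hclass p hp with ⟨h1, h2, h3, _⟩ | ⟨h1, _, ⟨hk, e0, e1, e2⟩ | ⟨hk, hv, e0, e1, e2⟩ | ⟨hk, hv, e1, e0, e2⟩ | ⟨hk, hv, e2, e0, e1⟩⟩
      · simp [h1, h2, h3]
      · simp [h1, hk]
      · simp [h1, hk, hv]
      · simp [h1, hk, hv]
      · simp [h1, hk, hv]
    -- the four classes sort as A sorts them
    have hb0 : PySem.List.sorted2 (tehai.filter (fun pai => pvIsNum pai && (pvSuitStr pai == t0))) (pvK1 (pvRank3 t0 t1 t2)) pvK2 false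
        = PySem.List.sorted (tehai.filter (fun pai => pvIsNum pai && (pvSuitStr pai == t0))) (fun x => x) false := by
      refine pv_sorted2_bucket _ _ _ 0 (fun p hp => ?_)
      obtain ⟨hpm, hpf⟩ := List.mem_filter.1 hp
      obtain ⟨hpn, hps⟩ := Bool.and_eq_true_iff.1 hpf
      rcases hclass p hpm with ⟨h1, _, _, _⟩ | ⟨h1, hk2, ⟨hk, e0, e1, e2⟩ | ⟨hk, hv, e0, e1, e2⟩ | ⟨hk, hv, e1, e0, e2⟩ | ⟨hk, hv, e2, e0, e1⟩⟩
      · rw [h1] at hpn; exact absurd hpn (by simp)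
      · exact absurd (eq_of_beq hps) e0
      · exact ⟨hv, hk2⟩
      · exact absurd (eq_of_beq hps) e0
      · exact absurd (eq_of_beq hps) e0
    have hb1 : PySem.List.sorted2 (tehai.filter (fun pai => pvIsNum pai && (pvSuitStr pai == t1))) (pvK1 (pvRank3 t0 t1 t2)) pvK2 false
        = PySem.List.sorted (tehai.filter (fun pai => pvIsNum pai && (pvSuitStr pai == t1))) (fun x => x) false := by
      refine pv_sorted2_bucket _ _ _ 1 (fun p hp => ?_)
      obtain ⟨hpm, hpf⟩ := List.mem_filter.1 hp
      obtain ⟨hpn, hps⟩ := Bool.and_eq_true_iff.1 hpf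
      rcases hclass p hpm with ⟨h1, _, _, _⟩ | ⟨h1, hk2, ⟨hk, e0, e1, e2⟩ | ⟨hk, hv, e0, e1, e2⟩ | ⟨hk, hv, e1, e0, e2⟩ | ⟨hk, hv, e2, e0, e1⟩⟩
      · rw [h1] at hpn; exact absurd hpn (by simp)
      · exact absurd (eq_of_beq hps) e1
      · exact absurd (eq_of_beq hps) e1
      · exact ⟨hv, hk2⟩
      · exact absurd (eq_of_beq hps) e1
    have hb2 : PySem.List.sorted2 (tehai.filter (fun pai => pvIsNum pai && (pvSuitStr pai == t2))) (pvK1 (pvRank3 t0 t1 t2)) pvK2 false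
        = PySem.List.sorted (tehai.filter (fun pai => pvIsNum pai && (pvSuitStr pai == t2))) (fun x => x) false := by
      refine pv_sorted2_bucket _ _ _ 2 (fun p hp => ?_)
      obtain ⟨hpm, hpf⟩ := List.mem_filter.1 hp
      obtain ⟨hpn, hps⟩ := Bool.and_eq_true_iff.1 hpf
      rcases hclass p hpm with ⟨h1, _, _, _⟩ | ⟨h1, hk2, ⟨hk, e0, e1, e2⟩ | ⟨hk, hv, e0, e1, e2⟩ | ⟨hk, hv, e1, e0, e2⟩ | ⟨hk, hv, e2, e0, e1⟩⟩
      · rw [h1] at hpn; exact absurd hpn (by simp)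
      · exact absurd (eq_of_beq hps) e2
      · exact absurd (eq_of_beq hps) e2
      · exact absurd (eq_of_beq hps) e2
      · exact ⟨hv, hk2⟩
    have hb3 : PySem.List.sorted2 (tehai.filter (fun pai => !pvIsNum pai)) (pvK1 (pvRank3 t0 t1 t2)) pvK2 false
        = tehai.filter (fun pai => !pvIsNum pai) := by
      refine pv_sorted2_honors _ _ _ (fun p hp => ?_)
      obtain ⟨hpm, hpf⟩ := List.mem_filter.1 hp
      rcases hclass p hpm with ⟨h1, _, h3, h4⟩ | ⟨h1, _, _⟩
      · exact ⟨h3, h4⟩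
      · rw [h1] at hpf; exact absurd hpf (by simp)
    rw [hA, hB, hs0, hs1, hs2, hC0, hC1, hC2, hC3, hb0, hb1, hb2, hb3]
  · -- fewer than 3 suit names but no digit-led tile
    have hnum : ∀ p ∈ tehai, pvIsNum p = false := by
      intro p hp
      have h1 := (hgood p hp).1
      have h2 := hnodigit p hp
      unfold pvIsNum
      match hv : p.toList, h1 with
      | c :: cs, _ =>
        have : PySem.Str.pyGet? p 0 = some c := by simp [hv]
        rw [this]
        simpa [hv] using h2
    -- A side: all suit buckets are empty, honors are the whole hand
    have hfil : ∀ s : String, tehai.filter (fun pai => pvIsNum pai && (pvSuitStr pai == s)) = [] := by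
      intro s
      apply List.filter_eq_nil_iff.mpr
      intro p hp
      simp [hnum p hp]
    have hhon : tehai.filter (fun pai => !pvIsNum pai) = tehai := by
      apply List.filter_eq_self.mpr
      intro p hp
      simp [hnum p hp]
    have hrange : PySem.List.pyRange 0 3 1 = [0, 1, 2] := by decide
    have hsortnil : PySem.List.sorted ([] : List String) (fun x => x) false = [] := by
      simp [PySem.List.sorted_eq_nil_iff]
    have hAside : tile_sort tehai tiles_type = tehai := by
      simp only [tile_sort, hrange, List.foldl_cons, List.foldl_nil]
      rw [pv_innerA_eq', pv_innerA_eq', pv_innerA_eq']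
      simp [hfil, hhon, hsortnil]
    -- B side: everything is kept and all keys tie at (3, '')
    have hkeep : tehai.filter (pvKeptP (pvRank tiles_type)) = tehai := by
      apply List.filter_eq_self.mpr
      intro p hp
      simp [pvKeptP, hnum p hp]
    have hBside : tile_sort_alt tehai tiles_type = tehai := by
      simp only [tile_sort_alt, hkeep]
      refine pv_sorted2_honors _ _ _ (fun p hp => ?_)
      exact ⟨by simp [pvK1, hnum p hp], by simp [pvK2, hnum p hp]⟩
    rw [hAside, hBside]


-- per-element count: a tile enters B's kept list at most as often as it enters A's buckets
theorem pv_elem_le (t0 t1 t2 p : String)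
    (hne : p.toList ≠ []) (_hlen : PySem.Chars.isdigit p.toList.headI = true → 2 ≤ p.toList.length) :
    (if pvKeptP (pvRank3 t0 t1 t2) p then 1 else 0)
      ≤ ((if pvIsNum p && (pvSuitStr p == t0) then 1 else 0)
        + (if pvIsNum p && (pvSuitStr p == t1) then 1 else 0)
        + (if pvIsNum p && (pvSuitStr p == t2) then 1 else 0)
        + (if !pvIsNum p then (1:Nat) else 0)) := by
  rcases hl : p.toList with _ | ⟨c0, cs⟩
  · exact absurd hl hne
  have hnum : pvIsNum p = PySem.Chars.isdigit c0 := by simp [pvIsNum, hl]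
  by_cases hd : PySem.Chars.isdigit c0
  · have hkept : pvKeptP (pvRank3 t0 t1 t2) p
        = (pvSuitStr p == t2 || (pvSuitStr p == t1 || pvSuitStr p == t0)) := by
      simp [pvKeptP, pvRank3, hnum, hd, PySem.Dict.contains_insert, PySem.Dict.contains_empty]
    by_cases e0 : pvSuitStr p = t0 <;> by_cases e1 : pvSuitStr p = t1 <;> by_cases e2 : pvSuitStr p = t2 <;>
      simp [hkept, hnum, hd, e0, e1, e2] <;> split_ifs <;> omega
  · simp [pvKeptP, hnum, hd]

-- and strictly less often for a tile whose suit is duplicated among the first three suit names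
theorem pv_elem_strict (t0 t1 t2 p : String)
    (hne : p.toList ≠ []) (hlen : PySem.Chars.isdigit p.toList.headI = true → 2 ≤ p.toList.length)
    (hd : PySem.Chars.isdigit p.toList.headI = true)
    (hc : 2 ≤ ([t0, t1, t2]).count (String.ofList [p.toList.tail.headI])) :
    (if pvKeptP (pvRank3 t0 t1 t2) p then 1 else 0) + 1
      ≤ ((if pvIsNum p && (pvSuitStr p == t0) then 1 else 0)
        + (if pvIsNum p && (pvSuitStr p == t1) then 1 else 0)
        + (if pvIsNum p && (pvSuitStr p == t2) then 1 else 0)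
        + (if !pvIsNum p then (1:Nat) else 0)) := by
  rcases hl : p.toList with _ | ⟨c0, cs⟩
  · exact absurd hl hne
  have hnum : pvIsNum p = PySem.Chars.isdigit c0 := by simp [pvIsNum, hl]
  have hd0 : PySem.Chars.isdigit c0 = true := by simpa [hl] using hd
  have hlen2 : 2 ≤ p.toList.length := hlen hd
  rcases hcs : cs with _ | ⟨c1, cs'⟩
  · rw [hcs] at hl; rw [hl] at hlen2; simp at hlen2
  have hsuit : pvSuitStr p = String.ofList [c1] := by simp [pvSuitStr, hl, hcs]
  have hc' : 2 ≤ ([t0, t1, t2]).count (pvSuitStr p) := by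
    rw [hsuit]; simpa [hl, hcs] using hc
  have hkept : pvKeptP (pvRank3 t0 t1 t2) p
      = (pvSuitStr p == t2 || (pvSuitStr p == t1 || pvSuitStr p == t0)) := by
    simp [pvKeptP, pvRank3, hnum, hd0, PySem.Dict.contains_insert, PySem.Dict.contains_empty]
  by_cases e0 : pvSuitStr p = t0 <;> by_cases e1 : pvSuitStr p = t1 <;> by_cases e2 : pvSuitStr p = t2
  · have b0 : (pvSuitStr p == t0) = true := beq_iff_eq.mpr e0
    have b1 : (pvSuitStr p == t1) = true := beq_iff_eq.mpr e1
    have b2 : (pvSuitStr p == t2) = true := beq_iff_eq.mpr e2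
    simp [hkept, b0, b1, b2, hnum, hd0]
  · have b0 : (pvSuitStr p == t0) = true := beq_iff_eq.mpr e0
    have b1 : (pvSuitStr p == t1) = true := beq_iff_eq.mpr e1
    have b2 : (pvSuitStr p == t2) = false := by simp [e2]
    simp [hkept, b0, b1, b2, hnum, hd0]
  · have b0 : (pvSuitStr p == t0) = true := beq_iff_eq.mpr e0
    have b1 : (pvSuitStr p == t1) = false := by simp [e1]
    have b2 : (pvSuitStr p == t2) = true := beq_iff_eq.mpr e2
    simp [hkept, b0, b1, b2, hnum, hd0]
  · exfalso
    have c0 : (t0 == pvSuitStr p) = true := beq_iff_eq.mpr e0.symm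
    have c1 : (t1 == pvSuitStr p) = false := by simp [Ne.symm e1]
    have c2 : (t2 == pvSuitStr p) = false := by simp [Ne.symm e2]
    simp [List.count_cons, c0, c1, c2] at hc'
  · have b0 : (pvSuitStr p == t0) = false := by simp [e0]
    have b1 : (pvSuitStr p == t1) = true := beq_iff_eq.mpr e1
    have b2 : (pvSuitStr p == t2) = true := beq_iff_eq.mpr e2
    simp [hkept, b0, b1, b2, hnum, hd0]
  · exfalso
    have c0 : (t0 == pvSuitStr p) = false := by simp [Ne.symm e0]
    have c1 : (t1 == pvSuitStr p) = true := beq_iff_eq.mpr e1.symm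
    have c2 : (t2 == pvSuitStr p) = false := by simp [Ne.symm e2]
    simp [List.count_cons, c0, c1, c2] at hc'
  · exfalso
    have c0 : (t0 == pvSuitStr p) = false := by simp [Ne.symm e0]
    have c1 : (t1 == pvSuitStr p) = false := by simp [Ne.symm e1]
    have c2 : (t2 == pvSuitStr p) = true := beq_iff_eq.mpr e2.symm
    simp [List.count_cons, c0, c1, c2] at hc'
  · exfalso
    have c0 : (t0 == pvSuitStr p) = false := by simp [Ne.symm e0]
    have c1 : (t1 == pvSuitStr p) = false := by simp [Ne.symm e1]
    have c2 : (t2 == pvSuitStr p) = false := by simp [Ne.symm e2]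
    simp [List.count_cons, c0, c1, c2] at hc'

-- list-level: B keeps at most as many tiles as A's four output pieces hold together
theorem pv_countP_le (t0 t1 t2 : String) (l : List String)
    (hg : ∀ p ∈ l, p.toList ≠ [] ∧ (PySem.Chars.isdigit p.toList.headI = true → 2 ≤ p.toList.length)) :
    l.countP (pvKeptP (pvRank3 t0 t1 t2))
      ≤ l.countP (fun p => pvIsNum p && (pvSuitStr p == t0))
        + l.countP (fun p => pvIsNum p && (pvSuitStr p == t1))
        + l.countP (fun p => pvIsNum p && (pvSuitStr p == t2))
        + l.countP (fun p => !pvIsNum p) := by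
  induction l with
  | nil => simp
  | cons p t ih =>
    have hp := hg p (by simp)
    have helem := pv_elem_le t0 t1 t2 p hp.1 hp.2
    have iht := ih (fun q hq => hg q (by simp [hq]))
    simp only [List.countP_cons]
    split_ifs at helem ⊢ <;> omega

theorem pv_countP_lt (t0 t1 t2 : String) (l : List String)
    (hg : ∀ p ∈ l, p.toList ≠ [] ∧ (PySem.Chars.isdigit p.toList.headI = true → 2 ≤ p.toList.length))
    (hw : ∃ p ∈ l, PySem.Chars.isdigit p.toList.headI = true ∧
      2 ≤ ([t0, t1, t2]).count (String.ofList [p.toList.tail.headI])) :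
    l.countP (pvKeptP (pvRank3 t0 t1 t2))
      < l.countP (fun p => pvIsNum p && (pvSuitStr p == t0))
        + l.countP (fun p => pvIsNum p && (pvSuitStr p == t1))
        + l.countP (fun p => pvIsNum p && (pvSuitStr p == t2))
        + l.countP (fun p => !pvIsNum p) := by
  obtain ⟨p, hp, hd, hc⟩ := hw
  obtain ⟨l1, l2, rfl⟩ := List.append_of_mem hp
  have hgp := hg p (by simp)
  have h1 := pv_countP_le t0 t1 t2 l1 (fun q hq => hg q (by simp [hq]))
  have h2 := pv_countP_le t0 t1 t2 l2 (fun q hq => hg q (by simp [hq]))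
  have helem := pv_elem_strict t0 t1 t2 p hgp.1 hgp.2 hd hc
  simp only [List.countP_append, List.countP_cons]
  split_ifs at helem ⊢ <;> omega

theorem tile_sort_tight_main (tehai : List String) (tiles_type : List String)
    (hpre : Pre_tile_sort tehai tiles_type) (hD : D_tile_sort tehai tiles_type) :
    tile_sort tehai tiles_type ≠ tile_sort_alt tehai tiles_type := by
  obtain ⟨hgood, hcase⟩ := hpre
  obtain ⟨p, hp, hd, hc⟩ := hD
  have hlen3 : 3 ≤ tiles_type.length := by
    rcases hcase with h | h
    · exact h
    · exact absurd (h p hp) (by simp [hd])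
  obtain ⟨t0, t1, t2, rest, rfl⟩ : ∃ t0 t1 t2 rest, tiles_type = t0 :: t1 :: t2 :: rest := by
    match tiles_type, hlen3 with
    | t0 :: t1 :: t2 :: rest, _ => exact ⟨t0, t1, t2, rest, rfl⟩
  have hc' : 2 ≤ ([t0, t1, t2]).count (String.ofList [p.toList.tail.headI]) := by
    simpa [List.take_succ_cons, List.take_zero] using hc
  intro heq
  have hlenA : (tile_sort tehai (t0 :: t1 :: t2 :: rest)).length
      = tehai.countP (fun p => pvIsNum p && (pvSuitStr p == t0))
        + tehai.countP (fun p => pvIsNum p && (pvSuitStr p == t1))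
        + tehai.countP (fun p => pvIsNum p && (pvSuitStr p == t2))
        + tehai.countP (fun p => !pvIsNum p) := by
    rw [pv_A_eq]
    simp [PySem.List.length_sorted, ← List.countP_eq_length_filter]
    omega
  have hlenB : (tile_sort_alt tehai (t0 :: t1 :: t2 :: rest)).length
      = tehai.countP (pvKeptP (pvRank3 t0 t1 t2)) := by
    simp only [tile_sort_alt, pv_rank_eq]
    rw [(PySem.List.sorted2_perm _ _ _ _).length_eq]
    exact List.countP_eq_length_filter.symm
  have hlt := pv_countP_lt t0 t1 t2 tehai hgood ⟨p, hp, hd, hc'⟩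
  rw [heq, hlenB] at hlenA
  omega

-- ===== VERDICT (by name: the statement is the Claim_ definition above) =====
theorem tile_sort_spec : Claim_unchanged_tile_sort := by
  intro tehai tiles_type _hdom hpre hnd
  exact tile_sort_main tehai tiles_type hpre hnd

theorem tile_sort_changed : Claim_changed_tile_sort := by
  unfold Claim_changed_tile_sort; decide

theorem tile_sort_tight : Claim_exact_tile_sort := by
  intro tehai tiles_type _hdom hpre hD
  exact tile_sort_tight_main tehai tiles_type hpre hD
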